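-- pv_equiv track=rewrite | github.com/FullLengthFanatic/scnoisemeter | tests/benchmark/synthesize_bam.py | _build_coding_overlap_regions
-- ===== SOURCE A (Python) =====
-- READ_LEN = 100
--
-- _CODING_BIOTYPES = {
--     "protein_coding", "IG_C_gene", "IG_D_gene", "IG_J_gene", "IG_V_gene",
--     "TR_C_gene", "TR_D_gene", "TR_J_gene", "TR_V_gene",
-- }
--
-- def _classify_overlap_type(a: str, b: str) -> str:
--     a_cod = a in _CODING_BIOTYPES
--     b_cod = b in _CODING_BIOTYPES
--     if a_cod and b_cod:
--         return "cod_cod"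
--     if a_cod or b_cod:
--         return "cod_ncod"
--     return "ncod_ncod"
--
-- def _build_coding_overlap_regions(genes, exons):
--     """
--     Walk same-strand exon pairs across DIFFERENT genes and emit exon-level
--     overlap intervals classified by biotype. scnoisemeter computes the shared
--     ambiguous regions on exons (not gene bodies) — see the note in
--     annotation.py _unique_and_shared: intronic overlaps between gene bodies are
--     not ambiguous for noise quantification.
--     """
--     biotype_by_gene: dict[str, str] = {gid: bt for _, _, _, gid, bt in genes}
--     cod_cod: list[tuple[int, int, str]] = []
--     cod_ncod: list[tuple[int, int, str]] = []
--
--     for strand in ("+", "-"):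
--         same_strand = [
--             (s, e, gid) for s, e, st, gid in exons
--             if st == strand and gid is not None
--         ]
--         same_strand.sort(key=lambda x: x[0])
--         for i, (si, ei, gi) in enumerate(same_strand):
--             bi = biotype_by_gene.get(gi, "")
--             for sj, ej, gj in same_strand[i + 1 :]:
--                 if sj >= ei:
--                     break
--                 if gi == gj:
--                     continue
--                 ov_start = max(si, sj)
--                 ov_end = min(ei, ej)
--                 if ov_end - ov_start < READ_LEN + 40:
--                     continue
--                 bj = biotype_by_gene.get(gj, "")
--                 kind = _classify_overlap_type(bi, bj)
--                 if kind == "cod_cod":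
--                     cod_cod.append((ov_start, ov_end, strand))
--                 else:
--                     # cod_ncod and ncod_ncod both land in AMBIGUOUS_COD_NCOD
--                     # per the classifier's shared-set definition.
--                     cod_ncod.append((ov_start, ov_end, strand))
--
--     return cod_cod, cod_ncod
-- ===== SOURCE B (Python) =====
-- READ_LEN = 100
--
-- _CODING_BIOTYPES = {
--     "protein_coding", "IG_C_gene", "IG_D_gene", "IG_J_gene", "IG_V_gene",
--     "TR_C_gene", "TR_D_gene", "TR_J_gene", "TR_V_gene",
-- }
--
--
-- def _build_coding_overlap_regions(genes, exons):
--     # Last assignment wins, like the dict comprehension in the original.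
--     is_coding = {gid: bt in _CODING_BIOTYPES for _, _, _, gid, bt in genes}
--     cod_cod = []
--     cod_ncod = []
--     for strand in ("+", "-"):
--         same_strand = sorted(
--             [(s, e, gid) for s, e, st, gid in exons if st == strand and gid is not None],
--             key=lambda x: x[0],
--         )
--         # Enumerate every ordered pair (i < j); because same_strand is sorted by
--         # start, the filter sj < ei keeps exactly the overlapping candidates.
--         hits = [
--             (max(si, sj), min(ei, ej),
--              is_coding.get(gi, False) and is_coding.get(gj, False))
--             for k, (si, ei, gi) in enumerate(same_strand)
--             for sj, ej, gj in same_strand[k + 1:]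
--             if sj < ei and gi != gj
--             and min(ei, ej) - max(si, sj) >= READ_LEN + 40
--         ]
--         cod_cod.extend((a, b, strand) for a, b, both in hits if both)
--         cod_ncod.extend((a, b, strand) for a, b, both in hits if not both)
--     return cod_cod, cod_ncod
-- ===== Notes on version B (the rewrite author's own statement) =====
-- stated objective: alternative
-- what changed: Replaces the break-terminated forward scan and the string-valued three-way classifier by a full enumeration of index pairs filtered with sj < ei (valid because the list is sorted by start), classifying via a precomputed gene->bool coding dict and partitioning the per-strand hit list at the end instead of appending inside the scan.
import Mathlib
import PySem

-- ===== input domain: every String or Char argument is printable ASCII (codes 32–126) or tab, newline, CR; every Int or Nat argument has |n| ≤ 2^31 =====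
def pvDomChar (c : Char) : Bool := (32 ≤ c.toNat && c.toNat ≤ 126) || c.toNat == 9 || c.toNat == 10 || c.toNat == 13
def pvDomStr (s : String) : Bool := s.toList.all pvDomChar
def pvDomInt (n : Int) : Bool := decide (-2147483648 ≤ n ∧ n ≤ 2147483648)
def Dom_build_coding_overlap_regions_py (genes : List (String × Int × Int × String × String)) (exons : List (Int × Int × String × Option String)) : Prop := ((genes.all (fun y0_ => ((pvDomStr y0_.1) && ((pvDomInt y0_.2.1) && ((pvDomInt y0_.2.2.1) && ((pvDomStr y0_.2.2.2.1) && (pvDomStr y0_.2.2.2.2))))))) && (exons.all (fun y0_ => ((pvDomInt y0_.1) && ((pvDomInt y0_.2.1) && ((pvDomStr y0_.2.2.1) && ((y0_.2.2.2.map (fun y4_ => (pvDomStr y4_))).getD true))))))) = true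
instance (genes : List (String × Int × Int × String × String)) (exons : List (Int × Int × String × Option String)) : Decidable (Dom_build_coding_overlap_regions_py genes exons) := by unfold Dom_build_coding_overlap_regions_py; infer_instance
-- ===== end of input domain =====

-- B replaces A's break-terminated scan + string classifier by a filtered full pair
-- enumeration with a precomputed boolean coding dict and an end partition (alternative; same cost).


-- ===== PORT A =====
-- the Python set _CODING_BIOTYPES
def pvCoding : PySem.Set String := PySem.Set.ofList
  ["protein_coding", "IG_C_gene", "IG_D_gene", "IG_J_gene", "IG_V_gene",
   "TR_C_gene", "TR_D_gene", "TR_J_gene", "TR_V_gene"]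

-- _classify_overlap_type
def classify_overlap_type_py (a b : String) : String :=
  let a_cod := pvCoding.contains a
  let b_cod := pvCoding.contains b
  if a_cod && b_cod then "cod_cod"
  else if a_cod || b_cod then "cod_ncod"
  else "ncod_ncod"

-- biotype_by_gene = {gid: bt for _, _, _, gid, bt in genes}
def pvBiotypeDict (genes : List (String × Int × Int × String × String)) : PySem.Dict String String :=
  genes.foldl (fun d g => d.insert g.2.2.2.1 g.2.2.2.2) PySem.Dict.empty

-- [(s, e, gid) for s, e, st, gid in exons if st == strand and gid is not None], sorted by start
def pvSameStrandA (exons : List (Int × Int × String × Option String)) (strand : String) : List (Int × Int × String) :=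
  PySem.List.sorted
    (exons.filterMap (fun e => if e.2.2.1 == strand then e.2.2.2.map (fun g => (e.1, e.2.1, g)) else none))
    (fun x => x.1) false

-- the inner 'for sj, ej, gj in same_strand[i+1:]' loop with its break
def pvInnerA (bt : PySem.Dict String String) (strand : String) (bi : String) (si ei : Int) (gi : String) :
    List (Int × Int × String) → (List (Int × Int × String)) × (List (Int × Int × String)) →
    (List (Int × Int × String)) × (List (Int × Int × String))
  | [], acc => acc
  | (sj, ej, gj) :: rest, acc =>
    if sj ≥ ei then acc  -- break
    else if gi == gj then pvInnerA bt strand bi si ei gi rest acc  -- continue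
    else
      let ov_start := max si sj
      let ov_end := min ei ej
      if ov_end - ov_start < 100 + 40 then pvInnerA bt strand bi si ei gi rest acc  -- continue
      else
        let bj := bt.getD gj ""
        let kind := classify_overlap_type_py bi bj
        if kind == "cod_cod" then
          pvInnerA bt strand bi si ei gi rest (acc.1 ++ [(ov_start, ov_end, strand)], acc.2)
        else
          pvInnerA bt strand bi si ei gi rest (acc.1, acc.2 ++ [(ov_start, ov_end, strand)])

-- the outer 'for i, (si, ei, gi) in enumerate(same_strand)' loop (rest = same_strand[i+1:])
def pvOuterA (bt : PySem.Dict String String) (strand : String) :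
    List (Int × Int × String) → (List (Int × Int × String)) × (List (Int × Int × String)) →
    (List (Int × Int × String)) × (List (Int × Int × String))
  | [], acc => acc
  | (si, ei, gi) :: rest, acc =>
      let bi := bt.getD gi ""
      pvOuterA bt strand rest (pvInnerA bt strand bi si ei gi rest acc)

def build_coding_overlap_regions_py (genes : List (String × Int × Int × String × String)) (exons : List (Int × Int × String × Option String)) : (List (Int × Int × String)) × (List (Int × Int × String)) :=
  let bt := pvBiotypeDict genes
  ["+", "-"].foldl (fun acc strand => pvOuterA bt strand (pvSameStrandA exons strand) acc) ([], [])

-- ===== PORT B =====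
-- is_coding = {gid: bt in _CODING_BIOTYPES for _, _, _, gid, bt in genes}
def pvIsCodingDict (genes : List (String × Int × Int × String × String)) : PySem.Dict String Bool :=
  genes.foldl (fun d g => d.insert g.2.2.2.1 (pvCoding.contains g.2.2.2.2)) PySem.Dict.empty

def pvSameStrandB (exons : List (Int × Int × String × Option String)) (strand : String) : List (Int × Int × String) :=
  PySem.List.sorted
    (exons.filterMap (fun e => if e.2.2.1 == strand then e.2.2.2.map (fun g => (e.1, e.2.1, g)) else none))
    (fun x => x.1) false

-- the per-strand 'hits' comprehension: all pairs (k, j>k), filtered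
def pvHitsB (ic : PySem.Dict String Bool) (ss : List (Int × Int × String)) : List (Int × Int × Bool) :=
  (PySem.List.enumerate ss 0).flatMap (fun kx =>
    (PySem.List.slice ss (some (kx.1 + 1)) none).filterMap (fun y =>
      if y.1 < kx.2.2.1 ∧ kx.2.2.2 ≠ y.2.2 ∧ 100 + 40 ≤ min kx.2.2.1 y.2.1 - max kx.2.1 y.1
      then some (max kx.2.1 y.1, min kx.2.2.1 y.2.1, ic.getD kx.2.2.2 false && ic.getD y.2.2 false)
      else none))

def build_coding_overlap_regions_py_alt (genes : List (String × Int × Int × String × String)) (exons : List (Int × Int × String × Option String)) : (List (Int × Int × String)) × (List (Int × Int × String)) :=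
  let ic := pvIsCodingDict genes
  ["+", "-"].foldl (fun acc strand =>
    let ss := pvSameStrandB exons strand
    let hits := pvHitsB ic ss
    (acc.1 ++ (hits.filter (fun h => h.2.2)).map (fun h => (h.1, h.2.1, strand)),
     acc.2 ++ (hits.filter (fun h => !h.2.2)).map (fun h => (h.1, h.2.1, strand))))
    ([], [])

-- ===== PRECONDITION & SPEC =====
def Spec_build_coding_overlap_regions_py (genes : List (String × Int × Int × String × String)) (exons : List (Int × Int × String × Option String)) (out : (List (Int × Int × String)) × (List (Int × Int × String))) : Prop := out = build_coding_overlap_regions_py_alt genes exons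
instance (genes : List (String × Int × Int × String × String)) (exons : List (Int × Int × String × Option String)) (out : (List (Int × Int × String)) × (List (Int × Int × String))) : Decidable (Spec_build_coding_overlap_regions_py genes exons out) := by unfold Spec_build_coding_overlap_regions_py; infer_instance

-- ===== CLAIM (what is proved, stated in full; the proofs are below) =====
def Claim_equal_build_coding_overlap_regions_py : Prop := ∀ (genes : List (String × Int × Int × String × String)) (exons : List (Int × Int × String × Option String)), Dom_build_coding_overlap_regions_py genes exons → Spec_build_coding_overlap_regions_py genes exons (build_coding_overlap_regions_py genes exons)

-- ===== LEMMAS AND PROOFS =====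

-- proof-side record of one candidate pair (what B's comprehension emits)
def pairHit (ic : PySem.Dict String Bool) (si ei : Int) (gi : String) (y : Int × Int × String) : Option (Int × Int × Bool) :=
  if y.1 < ei ∧ gi ≠ y.2.2 ∧ 100 + 40 ≤ min ei y.2.1 - max si y.1
  then some (max si y.1, min ei y.2.1, ic.getD gi false && ic.getD y.2.2 false)
  else none

-- the two dicts agree: is_coding.get(g, False) = (biotype_by_gene.get(g, "") in _CODING_BIOTYPES)
lemma icoding_fold (gs : List (String × Int × Int × String × String))
    (d1 : PySem.Dict String String) (d2 : PySem.Dict String Bool)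
    (h : ∀ g, d2.getD g false = pvCoding.contains (d1.getD g "")) :
    ∀ g, (gs.foldl (fun d g => d.insert g.2.2.2.1 (pvCoding.contains g.2.2.2.2)) d2).getD g false
       = pvCoding.contains ((gs.foldl (fun d g => d.insert g.2.2.2.1 g.2.2.2.2) d1).getD g "") := by
  induction gs generalizing d1 d2 with
  | nil => exact h
  | cons x t ih =>
    simp only [List.foldl_cons]
    refine ih _ _ (fun g => ?_)
    by_cases hg : g = x.2.2.2.1
    · subst hg
      rw [PySem.Dict.getD_insert_self, PySem.Dict.getD_insert_self]
    · rw [PySem.Dict.getD_insert_of_ne _ _ _ hg, PySem.Dict.getD_insert_of_ne _ _ _ hg]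
      exact h g

lemma icoding_eq (genes : List (String × Int × Int × String × String)) (g : String) :
    (pvIsCodingDict genes).getD g false = pvCoding.contains ((pvBiotypeDict genes).getD g "") := by
  refine icoding_fold genes _ _ (fun g => ?_) g
  simp [PySem.Dict.getD, PySem.Dict.get?, PySem.Dict.empty]
  decide

-- A's three-way classifier lands in cod_cod iff both biotypes are coding
lemma classify_eq (a b : String) :
    (classify_overlap_type_py a b == "cod_cod") = (pvCoding.contains a && pvCoding.contains b) := by
  unfold classify_overlap_type_py
  cases h1 : pvCoding.contains a <;> cases h2 : pvCoding.contains b <;> simp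

lemma enumerate_shift {α : Type} (t : List α) (s : Int) :
    PySem.List.enumerate t (s + 1) = (PySem.List.enumerate t s).map (fun p => (p.1 + 1, p.2)) := by
  induction t generalizing s with
  | nil => simp [PySem.List.enumerate_nil]
  | cons x xs ih => simp [PySem.List.enumerate_cons, ih]

lemma hits_shift {α β : Type} (x : α) (t : List α) (g : α → α → Option β) (s : Int) (hs : 0 ≤ s) :
    (PySem.List.enumerate t (s + 1)).flatMap
        (fun kx => (PySem.List.slice (x :: t) (some (kx.1 + 1)) none).filterMap (g kx.2))
      = (PySem.List.enumerate t s).flatMap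
        (fun kx => (PySem.List.slice t (some (kx.1 + 1)) none).filterMap (g kx.2)) := by
  rw [enumerate_shift]
  rw [List.flatMap_map]
  refine List.flatMap_congr (fun kx hk => ?_)
  obtain ⟨k, hklt, hkx⟩ := (PySem.List.mem_enumerate_iff _ _ _).1 hk
  have h0 : 0 ≤ kx.1 := by subst hkx; simp; omega
  have e1 : PySem.List.slice (x :: t) (some (kx.1 + 1 + 1)) none = (x :: t).drop (kx.1 + 1 + 1).toNat :=
    PySem.List.slice_from _ (by omega)
  have e2 : PySem.List.slice t (some (kx.1 + 1)) none = t.drop (kx.1 + 1).toNat :=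
    PySem.List.slice_from _ (by omega)
  simp only [e1, e2]
  have : (kx.1 + 1 + 1).toNat = (kx.1 + 1).toNat + 1 := by omega
  rw [this, List.drop_succ_cons]

lemma hits_nil (ic : PySem.Dict String Bool) : pvHitsB ic [] = [] := by
  simp [pvHitsB, PySem.List.enumerate_nil]

lemma hits_cons (ic : PySem.Dict String Bool) (x : Int × Int × String) (t : List (Int × Int × String)) :
    pvHitsB ic (x :: t) = t.filterMap (pairHit ic x.1 x.2.1 x.2.2) ++ pvHitsB ic t := by
  unfold pvHitsB
  rw [PySem.List.enumerate_cons, List.flatMap_cons]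
  congr 1
  · have e1 : PySem.List.slice (x :: t) (some ((0 : Int) + 1)) none = t := by
      norm_num
      rw [PySem.List.slice_from_one, List.tail_cons]
    rw [e1]
    rfl
  · exact hits_shift x t (fun a y =>
      if y.1 < a.2.1 ∧ a.2.2 ≠ y.2.2 ∧ 100 + 40 ≤ min a.2.1 y.2.1 - max a.1 y.1
      then some (max a.1 y.1, min a.2.1 y.2.1, ic.getD a.2.2 false && ic.getD y.2.2 false)
      else none) 0 le_rfl

-- inner loop with break = filterMap over the whole tail (valid on a start-sorted tail)
lemma inner_eq (bt : PySem.Dict String String) (ic : PySem.Dict String Bool)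
    (hrel : ∀ g, ic.getD g false = pvCoding.contains (bt.getD g ""))
    (strand : String) (si ei : Int) (gi : String) :
    ∀ (t : List (Int × Int × String)) (acc : (List (Int × Int × String)) × (List (Int × Int × String))),
      t.Pairwise (fun a b => a.1 ≤ b.1) →
      pvInnerA bt strand (bt.getD gi "") si ei gi t acc
        = (acc.1 ++ ((t.filterMap (pairHit ic si ei gi)).filter (fun h => h.2.2)).map (fun h => (h.1, h.2.1, strand)),
           acc.2 ++ ((t.filterMap (pairHit ic si ei gi)).filter (fun h => !h.2.2)).map (fun h => (h.1, h.2.1, strand))) := by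
  intro t
  induction t with
  | nil => intro acc _; simp [pvInnerA]
  | cons y r ih =>
    intro acc hp
    obtain ⟨sj, ej, gj⟩ := y
    have hhead : ∀ b ∈ r, sj ≤ b.1 := by
      intro b hb; exact (List.pairwise_cons.1 hp).1 b hb
    have htail : r.Pairwise (fun a b => a.1 ≤ b.1) := (List.pairwise_cons.1 hp).2
    by_cases hbreak : sj ≥ ei
    · -- break: every later start is ≥ sj ≥ ei, so the whole filterMap is empty
      have hnil : ((sj, ej, gj) :: r).filterMap (pairHit ic si ei gi) = [] := by
        rw [List.filterMap_eq_nil_iff]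
        intro y hy
        rcases List.mem_cons.1 hy with h | h
        · subst h; simp [pairHit]; intro hlt; omega
        · have := hhead y h
          simp [pairHit]; intro hlt; omega
      rw [hnil]
      simp [pvInnerA, hbreak]
    · have hbr : ¬ sj ≥ ei := hbreak
      have hlt : sj < ei := by omega
      by_cases hg : gi = gj
      · -- continue on same gene
        have : pairHit ic si ei gi (sj, ej, gj) = none := by simp [pairHit, hg]
        rw [List.filterMap_cons, this]
        simpa [pvInnerA, hbr, hg] using ih acc htail
      · by_cases hsz : min ei ej - max si sj < 100 + 40
        · have : pairHit ic si ei gi (sj, ej, gj) = none := by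
            simp [pairHit]; intro _ _; omega
          rw [List.filterMap_cons, this]
          have hA : pvInnerA bt strand (bt.getD gi "") si ei gi ((sj, ej, gj) :: r) acc
              = pvInnerA bt strand (bt.getD gi "") si ei gi r acc := by
            simp only [pvInnerA]
            rw [if_neg hbr, if_neg (by simp [hg]), if_pos (by omega)]
          rw [hA]
          exact ih acc htail
        · have hsz' : 100 + 40 ≤ min ei ej - max si sj := by omega
          have hemit : pairHit ic si ei gi (sj, ej, gj)
              = some (max si sj, min ei ej, ic.getD gi false && ic.getD gj false) := by
            simp [pairHit, hg, hlt]; omega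
          have hkind : (classify_overlap_type_py (bt.getD gi "") (bt.getD gj "") == "cod_cod")
              = (ic.getD gi false && ic.getD gj false) := by
            rw [classify_eq, hrel gi, hrel gj]
          rw [List.filterMap_cons, hemit]
          cases hboth : (ic.getD gi false && ic.getD gj false)
          · have hA : pvInnerA bt strand (bt.getD gi "") si ei gi ((sj, ej, gj) :: r) acc
                = pvInnerA bt strand (bt.getD gi "") si ei gi r
                    (acc.1, acc.2 ++ [(max si sj, min ei ej, strand)]) := by
              simp only [pvInnerA]
              rw [if_neg hbr, if_neg (by simp [hg]), if_neg (by omega), if_neg (by rw [hkind, hboth]; simp)]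
            rw [hA, ih _ htail]
            simp
          · have hA : pvInnerA bt strand (bt.getD gi "") si ei gi ((sj, ej, gj) :: r) acc
                = pvInnerA bt strand (bt.getD gi "") si ei gi r
                    (acc.1 ++ [(max si sj, min ei ej, strand)], acc.2) := by
              simp only [pvInnerA]
              rw [if_neg hbr, if_neg (by simp [hg]), if_neg (by omega), if_pos (by rw [hkind, hboth])]
            rw [hA, ih _ htail]
            simp

-- whole strand: A's scan = B's hit list partitioned
lemma strand_eq (bt : PySem.Dict String String) (ic : PySem.Dict String Bool)
    (hrel : ∀ g, ic.getD g false = pvCoding.contains (bt.getD g ""))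
    (strand : String) :
    ∀ (ss : List (Int × Int × String)) (acc : (List (Int × Int × String)) × (List (Int × Int × String))),
      ss.Pairwise (fun a b => a.1 ≤ b.1) →
      pvOuterA bt strand ss acc
        = (acc.1 ++ ((pvHitsB ic ss).filter (fun h => h.2.2)).map (fun h => (h.1, h.2.1, strand)),
           acc.2 ++ ((pvHitsB ic ss).filter (fun h => !h.2.2)).map (fun h => (h.1, h.2.1, strand))) := by
  intro ss
  induction ss with
  | nil => intro acc _; simp [pvOuterA, hits_nil]
  | cons x rest ih =>
    intro acc hp
    obtain ⟨si, ei, gi⟩ := x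
    have htail : rest.Pairwise (fun a b => a.1 ≤ b.1) := (List.pairwise_cons.1 hp).2
    show pvOuterA bt strand rest (pvInnerA bt strand (bt.getD gi "") si ei gi rest acc) = _
    rw [inner_eq bt ic hrel strand si ei gi rest acc htail, ih _ htail]
    rw [hits_cons]
    simp [List.filter_append, List.map_append, List.append_assoc]

-- ===== VERDICT (by name: the statement is the Claim_ definition above) =====
theorem build_coding_overlap_regions_py_spec : Claim_equal_build_coding_overlap_regions_py := by
  intro genes exons _
  unfold Spec_build_coding_overlap_regions_py
  unfold build_coding_overlap_regions_py build_coding_overlap_regions_py_alt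
  have hrel := fun g => icoding_eq genes g
  have hss : pvSameStrandA = pvSameStrandB := rfl
  have hp : ∀ strand, (pvSameStrandA exons strand).Pairwise (fun a b => a.1 ≤ b.1) :=
    fun strand => PySem.List.sorted_pairwise _ _
  simp only [List.foldl_cons, List.foldl_nil]
  rw [strand_eq (pvBiotypeDict genes) (pvIsCodingDict genes) hrel "+" _ _ (hp "+")]
  rw [strand_eq (pvBiotypeDict genes) (pvIsCodingDict genes) hrel "-" _ _ (hp "-")]
  rw [hss]
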